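-- pv_equiv track=rewrite | github.com/paiml/depyler | examples/test_itertools.py | take_while_positive
-- ===== SOURCE A (Python) =====
-- def take_while_positive(numbers: list[int]) -> list[int]:
--     """Take numbers while they are positive."""
--     taken: list[int] = []
--     for val in numbers:
--         if val > 0:
--             taken.append(val)
--         else:
--             return taken
--     return taken
-- ===== SOURCE B (Python) =====
-- def take_while_positive(numbers: list[int]) -> list[int]:
--     """Take numbers while they are positive."""
--     idx = next((i for i, v in enumerate(numbers) if v <= 0), len(numbers))
--     return numbers[:idx]
-- ===== Notes on version B (the rewrite author's own statement) =====
-- stated objective: idiomatic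
-- what changed: B first locates the cut point (index of the first non-positive element, defaulting to len) and then returns the slice numbers[:idx], instead of interleaving the test with appends in an accumulator loop.
import Mathlib
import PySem

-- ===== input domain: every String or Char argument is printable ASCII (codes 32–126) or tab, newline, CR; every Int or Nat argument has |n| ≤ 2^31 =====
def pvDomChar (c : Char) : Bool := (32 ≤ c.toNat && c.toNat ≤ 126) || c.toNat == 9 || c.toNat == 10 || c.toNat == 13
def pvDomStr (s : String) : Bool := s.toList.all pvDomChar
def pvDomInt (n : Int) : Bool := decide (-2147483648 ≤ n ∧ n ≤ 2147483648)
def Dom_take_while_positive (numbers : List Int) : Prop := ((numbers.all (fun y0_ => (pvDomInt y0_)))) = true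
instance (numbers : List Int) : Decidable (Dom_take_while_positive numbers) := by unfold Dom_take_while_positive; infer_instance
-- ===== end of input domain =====

-- B locates the index of the first non-positive element first and returns the slice up to it;
-- A interleaves the positivity test with appends to an accumulator (objective: idiomatic).

-- ===== PORT A =====
-- loop over numbers with accumulator `taken`; `else: return taken` is the early exit
def take_while_positive_aux (taken : List Int) : List Int → List Int
  | [] => taken
  | v :: rest => if v > 0 then take_while_positive_aux (taken ++ [v]) rest else taken

def take_while_positive (numbers : List Int) : List Int :=
  take_while_positive_aux [] numbers

-- ===== PORT B =====
-- idx = next((i for i, v in enumerate(numbers) if v <= 0), len(numbers)); return numbers[:idx]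
def take_while_positive_alt (numbers : List Int) : List Int :=
  let idx : Nat := (numbers.findIdx? (fun v => v ≤ 0)).getD numbers.length
  PySem.List.slice numbers none (some (Int.ofNat idx))

-- ===== PRECONDITION & SPEC =====
def Spec_take_while_positive (numbers : List Int) (out : List Int) : Prop := out = take_while_positive_alt numbers
instance (numbers : List Int) (out : List Int) : Decidable (Spec_take_while_positive numbers out) := by unfold Spec_take_while_positive; infer_instance

-- ===== CLAIM (what is proved, stated in full; the proofs are below) =====
def Claim_equal_take_while_positive : Prop := ∀ (numbers : List Int), Dom_take_while_positive numbers → Spec_take_while_positive numbers (take_while_positive numbers)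

-- ===== LEMMAS AND PROOFS =====

theorem take_while_positive_aux_eq (numbers : List Int) (taken : List Int) :
    take_while_positive_aux taken numbers = taken ++ numbers.takeWhile (fun v => decide (v > 0)) := by
  induction numbers generalizing taken with
  | nil => simp [take_while_positive_aux]
  | cons v rest ih =>
    simp only [take_while_positive_aux, List.takeWhile]
    by_cases h : v > 0 <;> simp [h, ih]

theorem alt_eq_takeWhile (numbers : List Int) :
    take_while_positive_alt numbers = numbers.takeWhile (fun v => decide (v > 0)) := by
  unfold take_while_positive_alt
  show PySem.List.slice numbers none (some (Int.ofNat ((numbers.findIdx? (fun v => v ≤ 0)).getD numbers.length))) = _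
  rw [show Int.ofNat ((numbers.findIdx? (fun v => v ≤ 0)).getD numbers.length)
        = (((numbers.findIdx? (fun v => v ≤ 0)).getD numbers.length : Nat) : Int) from rfl,
     PySem.List.slice_to_natCast]
  induction numbers with
  | nil => rfl
  | cons v rest ih =>
    simp only [List.findIdx?_cons, List.takeWhile]
    by_cases h : v ≤ 0
    · simp [h, show ¬ v > 0 by omega]
    · have hv : v > 0 := by omega
      simp only [h, decide_false, hv, decide_true]
      cases hf : rest.findIdx? (fun v => decide (v ≤ 0)) with
      | none => simp [hf] at ih ⊢; simpa using ih
      | some i => simp [hf] at ih ⊢; simpa using ih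

-- ===== VERDICT (by name: the statement is the Claim_ definition above) =====
theorem take_while_positive_spec : Claim_equal_take_while_positive := by
  intro numbers _
  unfold Spec_take_while_positive
  rw [take_while_positive, take_while_positive_aux_eq, alt_eq_takeWhile]
  simp
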